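-- pv_equiv track=rewrite | github.com/grupy-sp/encontros | 2016/dojo/dojo_imasters_2016_08_24/main.py | mundo_pequeno
-- ===== SOURCE A (Python) =====
-- def mundo_pequeno(amigos=[], quantidade=1, origem=(0, 0)):
--     minimo = amigos[0]
--     for amigo in amigos[1:]:
--         if abs(minimo[0] - origem[0]) > abs(amigo[0] - origem[0]):
--             minimo = amigo
--     if quantidade == 1:
--         return {minimo}
--     else:
--         amigos.remove(minimo)
--         r = list(mundo_pequeno(amigos, quantidade - 1, origem))[0]
--         minimo = {(minimo)}
--         minimo.add(r)
--         return minimo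
-- ===== SOURCE B (Python) =====
-- def mundo_pequeno(amigos=[], quantidade=1, origem=(0, 0)):
--     # Sort once by distance |x - origem_x|, take the quantidade nearest friends and
--     # return the nearest together with the quantidade-th nearest.  Does not mutate
--     # amigos (A removes chosen elements from it); the equivalence is about the return value.
--     por_distancia = sorted(amigos, key=lambda a: abs(a[0] - origem[0]))
--     vizinhos = por_distancia[:quantidade]
--     return {vizinhos[0], vizinhos[quantidade - 1]}
-- ===== Notes on version B (the rewrite author's own statement) =====
-- stated objective: simpler
-- what changed: Replaces A's mutate-and-recurse scheme (rescan for the minimum, remove it from amigos, recurse, rebuild sets) by a single stable sort by distance and two index lookups; B does not mutate amigos.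
-- outside the precondition, e.g. on mundo_pequeno([(1, 0), (1, 0), (2, 0)], 3, (0, 0)): A returns {(1, 0)}, B returns {(1, 0), (2, 0)}
import Mathlib
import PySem

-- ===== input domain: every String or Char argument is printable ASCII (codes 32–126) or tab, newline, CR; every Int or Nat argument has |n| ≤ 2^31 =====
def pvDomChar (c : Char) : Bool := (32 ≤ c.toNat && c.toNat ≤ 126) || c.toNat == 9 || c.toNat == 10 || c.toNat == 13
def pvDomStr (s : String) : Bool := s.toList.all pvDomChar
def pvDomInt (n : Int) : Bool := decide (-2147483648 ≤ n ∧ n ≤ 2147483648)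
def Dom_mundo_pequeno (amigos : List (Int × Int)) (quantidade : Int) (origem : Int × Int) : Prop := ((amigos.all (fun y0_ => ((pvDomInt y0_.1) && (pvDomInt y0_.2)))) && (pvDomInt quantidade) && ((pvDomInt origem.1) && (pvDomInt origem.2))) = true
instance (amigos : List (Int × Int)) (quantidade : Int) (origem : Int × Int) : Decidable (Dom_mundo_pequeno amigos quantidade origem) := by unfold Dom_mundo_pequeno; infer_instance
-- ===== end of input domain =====

-- B replaces A's mutate-and-recurse scheme by one stable sort by distance plus two index
-- lookups (objective: simpler). A mutates amigos (removes the chosen minima); B does not: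
-- the equivalence proved here is about the RETURN value only.

-- ===== PORT A =====
-- loop body of A's 'for amigo in amigos[1:]'
def pvStepA (origem minimo amigo : Int × Int) : Int × Int :=
  if |minimo.1 - origem.1| > |amigo.1 - origem.1| then amigo else minimo

def mundo_pequeno (amigos : List (Int × Int)) (quantidade : Int) (origem : Int × Int) : List (Int × Int) :=
  match amigos with
  | [] => []  -- amigos[0] raises IndexError (excluded by Pre_)
  | a0 :: rest =>
    let minimo := rest.foldl (pvStepA origem) a0
    if quantidade == 1 then PySem.Set.ofList [minimo]
    else
      match h : PySem.List.remove? (a0 :: rest) minimo with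
      | none => []  -- unreachable: ValueError (minimo is always a member)
      | some amigos' =>
        match mundo_pequeno amigos' (quantidade - 1) origem with
        | [] => []  -- list(...)[0] on an empty result raises IndexError (excluded by Pre_)
        | r :: _ => PySem.Set.add (PySem.Set.ofList [minimo]) r
termination_by amigos.length
decreasing_by
  have h' : PySem.List.remove? (a0 :: rest) (rest.foldl (pvStepA origem) a0) = some amigos' := by
    simpa only [minimo, List.foldl_attach] using h
  have hmem : (rest.foldl (pvStepA origem) a0) ∈ (a0 :: rest) := by
    by_contra hn
    rw [← PySem.List.remove?_eq_none_iff (xs := a0 :: rest)] at hn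
    rw [h'] at hn; cases hn
  have h2 := PySem.List.remove?_eq_some_erase (xs := a0 :: rest) (v := rest.foldl (pvStepA origem) a0) hmem
  rw [h'] at h2
  cases h2
  rw [List.length_erase_of_mem hmem]
  simp only [List.length_cons]
  omega

-- ===== PORT B =====
def mundo_pequeno_alt (amigos : List (Int × Int)) (quantidade : Int) (origem : Int × Int) : List (Int × Int) :=
  let por_distancia := PySem.List.sorted amigos (fun a => |a.1 - origem.1|) false
  let vizinhos := PySem.List.slice por_distancia none (some quantidade)
  match PySem.List.pyGet? vizinhos 0, PySem.List.pyGet? vizinhos (quantidade - 1) with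
  | some x, some y => PySem.Set.ofList [x, y]
  | _, _ => []  -- an out-of-range index raises IndexError

-- ===== PRECONDITION & SPEC =====
-- Pre_ excludes the inputs on which A raises IndexError (empty amigos, quantidade ≤ 0 or
-- quantidade > len(amigos)) and the inputs with quantidade ≥ 3 on which A still returns:
-- there A's value depends on Python's hash-based set iteration order (list(set)[0]), an
-- accident of the set implementation that no deterministic port can be claimed against.
def Pre_mundo_pequeno (amigos : List (Int × Int)) (quantidade : Int) (origem : Int × Int) : Prop :=
  amigos ≠ [] ∧ (quantidade = 1 ∨ (quantidade = 2 ∧ 2 ≤ amigos.length))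
instance (amigos : List (Int × Int)) (quantidade : Int) (origem : Int × Int) : Decidable (Pre_mundo_pequeno amigos quantidade origem) := by unfold Pre_mundo_pequeno; infer_instance

def pvWitness_mundo_pequeno : (List (Int × Int)) × Int × (Int × Int) := ([(5, 1), (2, 2), (9, 3)], 2, (3, 0))

def Spec_mundo_pequeno (amigos : List (Int × Int)) (quantidade : Int) (origem : Int × Int) (out : List (Int × Int)) : Prop := out = mundo_pequeno_alt amigos quantidade origem
instance (amigos : List (Int × Int)) (quantidade : Int) (origem : Int × Int) (out : List (Int × Int)) : Decidable (Spec_mundo_pequeno amigos quantidade origem out) := by unfold Spec_mundo_pequeno; infer_instance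

-- ===== CLAIM (what is proved, stated in full; the proofs are below) =====
def Claim_equal_mundo_pequeno : Prop := ∀ (amigos : List (Int × Int)) (quantidade : Int) (origem : Int × Int), Dom_mundo_pequeno amigos quantidade origem → Pre_mundo_pequeno amigos quantidade origem → Spec_mundo_pequeno amigos quantidade origem (mundo_pequeno amigos quantidade origem)

-- ===== LEMMAS AND PROOFS =====

-- the (head, second) evolution of the insertion-sort accumulator, as a pair fold
def pvStepB (origem : Int × Int) (p : (Int × Int) × Option (Int × Int)) (amigo : Int × Int) :
    (Int × Int) × Option (Int × Int) :=
  if |amigo.1 - origem.1| < |p.1.1 - origem.1| then (amigo, some p.1)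
  else
    match p.2 with
    | none => (p.1, some amigo)
    | some s => if |amigo.1 - origem.1| < |s.1 - origem.1| then (p.1, some amigo) else p

-- the second component of B's state, characterised: first-minimum of the list with the
-- first occurrence of the minimum erased
def pvSecondSpec (origem a0 : Int × Int) (rest : List (Int × Int)) : Option (Int × Int) :=
  match (a0 :: rest).erase (rest.foldl (pvStepA origem) a0) with
  | [] => none
  | c :: cs => some (cs.foldl (pvStepA origem) c)

theorem pvFold_mem (origem b : Int × Int) (xs : List (Int × Int)) :
    xs.foldl (pvStepA origem) b ∈ b :: xs := by
  induction xs generalizing b with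
  | nil => simp
  | cons x xs ih =>
    simp only [List.foldl_cons, pvStepA]
    split
    · have := ih x; simp at this ⊢; tauto
    · have := ih b; simp at this ⊢; tauto

theorem pvFold_le (origem b : Int × Int) (xs : List (Int × Int)) :
    ∀ y ∈ b :: xs, |(xs.foldl (pvStepA origem) b).1 - origem.1| ≤ |y.1 - origem.1| := by
  induction xs generalizing b with
  | nil => intro y hy; simp at hy; subst hy; exact le_refl _
  | cons x xs ih =>
    intro y hy
    have hstep_b : |(pvStepA origem b x).1 - origem.1| ≤ |b.1 - origem.1| := by
      by_cases h : |b.1 - origem.1| > |x.1 - origem.1| <;> simp [pvStepA, h]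
      exact le_of_lt h
    have hstep_x : |(pvStepA origem b x).1 - origem.1| ≤ |x.1 - origem.1| := by
      by_cases h : |b.1 - origem.1| > |x.1 - origem.1| <;> simp [pvStepA, h]
      omega
    have hhead := ih (pvStepA origem b x) (pvStepA origem b x) (by simp)
    simp only [List.foldl_cons]
    rcases List.mem_cons.1 hy with rfl | hy2
    · exact le_trans hhead hstep_b
    · rcases List.mem_cons.1 hy2 with rfl | hy3
      · exact le_trans hhead hstep_x
      · exact ih (pvStepA origem b x) y (List.mem_cons_of_mem _ hy3)

theorem pvFold_pair (origem a0 : Int × Int) (rest : List (Int × Int)) :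
    rest.foldl (pvStepB origem) (a0, none) =
      (rest.foldl (pvStepA origem) a0, pvSecondSpec origem a0 rest) := by
  induction rest using List.reverseRecOn with
  | nil => simp [pvSecondSpec]
  | append_singleton ys x ih =>
    rw [List.foldl_append, List.foldl_append, ih]
    simp only [List.foldl_cons, List.foldl_nil]
    by_cases hc : |x.1 - origem.1| < |(ys.foldl (pvStepA origem) a0).1 - origem.1|
    · have hstep : pvStepA origem (ys.foldl (pvStepA origem) a0) x = x := by
        simp [pvStepA, hc]
      have hx_notmem : x ∉ a0 :: ys := by
        intro hmem
        exact absurd (pvFold_le origem a0 ys x hmem) (not_le.2 hc)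
      have hsec : pvSecondSpec origem a0 (ys ++ [x]) = some (ys.foldl (pvStepA origem) a0) := by
        unfold pvSecondSpec
        rw [List.foldl_append]
        simp only [List.foldl_cons, List.foldl_nil]
        rw [hstep, ← List.cons_append, List.erase_append_right _ hx_notmem]
        simp
      rw [hsec, hstep]
      simp [pvStepB, hc]
    · have hstep : pvStepA origem (ys.foldl (pvStepA origem) a0) x
          = ys.foldl (pvStepA origem) a0 := by
        simp [pvStepA, hc]
      have hmem : ys.foldl (pvStepA origem) a0 ∈ a0 :: ys := pvFold_mem origem a0 ys
      have herase2 : (a0 :: (ys ++ [x])).erase (ys.foldl (pvStepA origem) a0)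
          = ((a0 :: ys).erase (ys.foldl (pvStepA origem) a0)) ++ [x] := by
        rw [← List.cons_append, List.erase_append_left _ hmem]
      rw [hstep]
      unfold pvSecondSpec
      rw [List.foldl_append]
      simp only [List.foldl_cons, List.foldl_nil]
      rw [hstep, herase2]
      rcases herase : (a0 :: ys).erase (ys.foldl (pvStepA origem) a0) with _ | ⟨c, cs⟩
      · simp [pvStepB, hc]
      · simp only [List.cons_append, List.foldl_append, List.foldl_cons, List.foldl_nil]
        by_cases hc2 : |x.1 - origem.1| < |(cs.foldl (pvStepA origem) c).1 - origem.1| <;>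
          simp [pvStepB, pvStepA, hc, hc2]

theorem pvSortHS (origem : Int × Int) (xs : List (Int × Int)) :
    ∀ (h : Int × Int) (t : List (Int × Int)),
      ∃ t', xs.foldl (fun acc x =>
              PySem.List.insertBy
                (fun a b => decide (|a.1 - origem.1| < |b.1 - origem.1|)) x acc) (h :: t)
            = (xs.foldl (pvStepB origem) (h, t.head?)).1 :: t'
          ∧ t'.head? = (xs.foldl (pvStepB origem) (h, t.head?)).2 := by
  induction xs with
  | nil => intro h t; exact ⟨t, rfl, rfl⟩
  | cons x xs ih =>
    intro h t
    simp only [List.foldl_cons]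
    by_cases hc : |x.1 - origem.1| < |h.1 - origem.1|
    · have hins : PySem.List.insertBy
          (fun a b => decide (|a.1 - origem.1| < |b.1 - origem.1|)) x (h :: t)
          = x :: h :: t := by simp [PySem.List.insertBy, hc]
      have hstep : pvStepB origem (h, t.head?) x = (x, some h) := by simp [pvStepB, hc]
      rw [hins, hstep]
      simpa using ih x (h :: t)
    · rcases t with _ | ⟨th, tt⟩
      · have hins : PySem.List.insertBy
            (fun a b => decide (|a.1 - origem.1| < |b.1 - origem.1|)) x [h]
            = h :: [x] := by simp [PySem.List.insertBy, hc]
        have hstep : pvStepB origem (h, ([] : List (Int × Int)).head?) x = (h, some x) := by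
          simp [pvStepB, hc]
        rw [hins, hstep]
        simpa using ih h [x]
      · by_cases hc2 : |x.1 - origem.1| < |th.1 - origem.1|
        · have hins : PySem.List.insertBy
              (fun a b => decide (|a.1 - origem.1| < |b.1 - origem.1|)) x (h :: th :: tt)
              = h :: x :: th :: tt := by simp [PySem.List.insertBy, hc, hc2]
          have hstep : pvStepB origem (h, (th :: tt).head?) x = (h, some x) := by
            simp [pvStepB, hc, hc2]
          rw [hins, hstep]
          simpa using ih h (x :: th :: tt)
        · have hins : PySem.List.insertBy
              (fun a b => decide (|a.1 - origem.1| < |b.1 - origem.1|)) x (h :: th :: tt)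
              = h :: th :: PySem.List.insertBy
                  (fun a b => decide (|a.1 - origem.1| < |b.1 - origem.1|)) x tt := by
            simp [PySem.List.insertBy, hc, hc2]
          have hstep : pvStepB origem (h, (th :: tt).head?) x = (h, some th) := by
            simp [pvStepB, hc, hc2]
          rw [hins, hstep]
          simpa using ih h (th :: PySem.List.insertBy
            (fun a b => decide (|a.1 - origem.1| < |b.1 - origem.1|)) x tt)

-- ===== VERDICT (by name: the statement is the Claim_ definition above) =====
theorem mundo_pequeno_spec : Claim_equal_mundo_pequeno := by
  intro amigos quantidade origem _ hpre
  obtain ⟨hne, hq⟩ := hpre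
  unfold Spec_mundo_pequeno
  rcases amigos with _ | ⟨a0, rest⟩
  · exact absurd rfl hne
  have hchar := pvSortHS origem rest a0 []
  simp only [List.head?_nil] at hchar
  rw [pvFold_pair] at hchar
  obtain ⟨t', ht1, ht2⟩ := hchar
  have hs : PySem.List.sorted (a0 :: rest) (fun a => |a.1 - origem.1|) false
      = (rest.foldl (pvStepA origem) a0) :: t' := by
    rw [PySem.List.sorted_eq_foldl_insertBy]
    simpa [PySem.List.insertBy] using ht1
  rcases hq with rfl | ⟨rfl, hlen⟩
  · -- quantidade = 1
    simp only [mundo_pequeno, mundo_pequeno_alt, beq_self_eq_true, if_true]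
    rw [hs]
    norm_num
    simp [PySem.List.pyGet?, PySem.List.pyIdx?, PySem.List.slice_to, PySem.Set.ofList, PySem.Set.add, PySem.Set.contains]
  · -- quantidade = 2, 2 ≤ length
    rcases rest with _ | ⟨a1, rest'⟩
    · simp at hlen
    have h21 : ((2 : Int) == 1) = false := by decide
    have hmem : ((a1 :: rest').foldl (pvStepA origem) a0) ∈ a0 :: a1 :: rest' :=
      pvFold_mem origem a0 (a1 :: rest')
    have hrem := PySem.List.remove?_eq_some_erase
      (xs := a0 :: a1 :: rest') (v := (a1 :: rest').foldl (pvStepA origem) a0) hmem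
    have hlen_erase := List.length_erase_of_mem hmem
    rcases herase : (a0 :: a1 :: rest').erase ((a1 :: rest').foldl (pvStepA origem) a0)
        with _ | ⟨c, cs⟩
    · rw [herase] at hlen_erase; simp at hlen_erase
    rw [herase] at hrem
    rw [pvSecondSpec, herase] at ht2
    rcases t' with _ | ⟨b1, bs⟩
    · simp at ht2
    simp only [List.head?_cons, Option.some.injEq] at ht2
    subst ht2
    simp only [mundo_pequeno, mundo_pequeno_alt, h21, Bool.false_eq_true, if_false]
    rw [hs]
    split
    · next h => rw [hrem] at h; cases h
    · next amigos' h =>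
      rw [hrem] at h
      obtain rfl := (Option.some.inj h).symm
      have h1 : (2 : Int) - 1 = 1 := by norm_num
      rw [h1]
      simp only [mundo_pequeno, beq_self_eq_true, if_true]
      have hpos : ∀ n : Nat, (0 : Int) ≤ (n : Int) + 1 := by intro n; positivity
      simp [PySem.List.pyGet?, PySem.List.pyIdx?, PySem.List.slice_to, PySem.Set.ofList,
        PySem.Set.add, PySem.Set.contains, hpos]
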